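-- pv_equiv track=rewrite | github.com/naveendennis/ai-sample | neural_network/train_evaluate_amazon_nn.py | get_unique_class_vocabulary
-- ===== SOURCE A (Python) =====
-- def get_duplicate_list(vocabulary_list):
--     """
--     Maintaining a duplicate list
--     """
--     dup_keys = []
--     for each_list in vocabulary_list:
--         all_keys =[]
--         for each_key in each_list:
--             if each_key in all_keys:
--                 dup_keys.append(each_key)
--             all_keys.append(each_key)
--     return dup_keys
--
-- def get_unique_class_vocabulary(vocabulary_list):
--     """
--
--     :param vocabulary_list: Contains a list of a list of vocabulary words.
--     :return: vocabulary_list is cleaned so that the same vocabulary words is not present in more than one category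
--                 and then the minimum len of the list in each category is returned
--     """
--
--     dup_keys = get_duplicate_list(vocabulary_list)
--
--     """
--     Removing duplicate items items from the duplicate list
--     """
--     vocab = []
--     for each_list in vocabulary_list:
--         new_vocab = []
--         for each_key in each_list:
--             if each_key not in dup_keys:
--                 new_vocab.append(each_key)
--         vocab.append(new_vocab)
--
--     return vocab, min([len(each_list) for each_list in vocab])
-- ===== SOURCE B (Python) =====
-- def get_unique_class_vocabulary(vocabulary_list):
--     bad = set()
--     for each_list in vocabulary_list:
--         s = sorted(each_list)
--         for x, y in zip(s, s[1:]):
--             if x == y: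
--                 bad.add(y)
--     vocab = [[w for w in each_list if w not in bad]
--              for each_list in vocabulary_list]
--     return vocab, min(len(each_list) for each_list in vocab)
-- ===== Notes on version B (the rewrite author's own statement) =====
-- stated objective: faster
-- what changed: Detects within-list duplicates by sorting each sublist and scanning adjacent pairs for equal neighbours (sort-then-scan) instead of A's incremental seen-so-far membership scans, then filters each list against the resulting set.
-- outside the precondition, e.g. on get_unique_class_vocabulary([]): A raises ValueError, B raises ValueError
import Mathlib
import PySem

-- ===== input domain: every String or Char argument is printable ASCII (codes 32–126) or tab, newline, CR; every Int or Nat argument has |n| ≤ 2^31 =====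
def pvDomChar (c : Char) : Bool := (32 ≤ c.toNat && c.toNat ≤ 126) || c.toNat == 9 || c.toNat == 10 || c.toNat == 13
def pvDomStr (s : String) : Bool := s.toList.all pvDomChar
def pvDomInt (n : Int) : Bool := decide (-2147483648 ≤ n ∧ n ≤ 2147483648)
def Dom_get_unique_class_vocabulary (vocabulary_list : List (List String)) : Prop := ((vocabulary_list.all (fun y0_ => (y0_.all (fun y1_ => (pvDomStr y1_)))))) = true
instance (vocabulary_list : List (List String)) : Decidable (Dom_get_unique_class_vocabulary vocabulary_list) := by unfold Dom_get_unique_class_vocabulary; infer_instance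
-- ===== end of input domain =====

-- B detects within-list duplicates by sorting each sublist and scanning adjacent
-- equal neighbours (sort-then-scan) instead of A's incremental seen-so-far scans
-- (objective: faster).


-- ===== PORT A =====
def get_duplicate_list (vocabulary_list : List (List String)) : List String :=
  vocabulary_list.foldl
    (fun dup_keys each_list =>
      (each_list.foldl
        (fun st each_key =>
          (if st.2.contains each_key then st.1 ++ [each_key] else st.1,
           st.2 ++ [each_key]))
        (dup_keys, ([] : List String))).1)
    []

def get_unique_class_vocabulary (vocabulary_list : List (List String)) : List (List String) × Int :=
  let dup_keys := get_duplicate_list vocabulary_list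
  let vocab := vocabulary_list.foldl
    (fun vocab each_list =>
      vocab ++ [each_list.foldl
        (fun new_vocab each_key =>
          if !(dup_keys.contains each_key) then new_vocab ++ [each_key] else new_vocab)
        []])
    []
  -- min([...]) raises on empty input; Pre_ excludes that, getD 0 is unreachable there
  (vocab, (PySem.List.min? (vocab.map (fun each_list => (each_list.length : Int))) (fun y => y)).getD 0)

-- ===== PORT B =====
def get_unique_class_vocabulary_alt (vocabulary_list : List (List String)) : List (List String) × Int :=
  let bad : PySem.Set String := vocabulary_list.foldl
    (fun bad each_list =>
      let s := PySem.List.sorted each_list (fun x => x) false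
      (s.zip (PySem.List.slice s (some 1) none)).foldl
        (fun b p => if p.1 == p.2 then PySem.Set.add b p.2 else b) bad)
    PySem.Set.empty
  let vocab := vocabulary_list.map
    (fun each_list => each_list.filter (fun w => !(PySem.Set.contains bad w)))
  (vocab, (PySem.List.min? (vocab.map (fun each_list => (each_list.length : Int))) (fun y => y)).getD 0)

-- ===== PRECONDITION & SPEC =====
-- Pre_ excludes only the empty input, on which A's min([]) raises ValueError (B's min raises too).
def Pre_get_unique_class_vocabulary (vocabulary_list : List (List String)) : Prop :=
  vocabulary_list ≠ []
instance (vocabulary_list : List (List String)) : Decidable (Pre_get_unique_class_vocabulary vocabulary_list) := by unfold Pre_get_unique_class_vocabulary; infer_instance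
def pvWitness_get_unique_class_vocabulary : List (List String) := [["a", "b", "a"], ["b", "c"]]
def Spec_get_unique_class_vocabulary (vocabulary_list : List (List String)) (out : List (List String) × Int) : Prop := out = get_unique_class_vocabulary_alt vocabulary_list
instance (vocabulary_list : List (List String)) (out : List (List String) × Int) : Decidable (Spec_get_unique_class_vocabulary vocabulary_list out) := by unfold Spec_get_unique_class_vocabulary; infer_instance

-- ===== CLAIM (what is proved, stated in full; the proofs are below) =====
def Claim_equal_get_unique_class_vocabulary : Prop := ∀ (vocabulary_list : List (List String)), Dom_get_unique_class_vocabulary vocabulary_list → Pre_get_unique_class_vocabulary vocabulary_list → Spec_get_unique_class_vocabulary vocabulary_list (get_unique_class_vocabulary vocabulary_list)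

-- ===== LEMMAS AND PROOFS =====

-- A's inner loop: a word lands in dup_keys iff it occurs in the list and was already
-- seen (counting the running all_keys prefix).
theorem dupA_inner_mem (l : List String) (dup all : List String) (w : String) :
    w ∈ (l.foldl
        (fun st each_key =>
          (if st.2.contains each_key then st.1 ++ [each_key] else st.1,
           st.2 ++ [each_key])) (dup, all)).1
      ↔ w ∈ dup ∨ (1 ≤ l.count w ∧ 2 ≤ all.count w + l.count w) := by
  induction l generalizing dup all with
  | nil => simp
  | cons k l ih =>
    simp only [List.foldl_cons, ih]
    by_cases hk : w = k
    · subst hk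
      by_cases hin : w ∈ all
      · have h1 : 1 ≤ all.count w := List.count_pos_iff.2 hin
        by_cases hd : w ∈ dup
        · simp [hin, hd, List.count_append]
        · simp [hin, hd, List.count_append]
          omega
      · have h0 : all.count w = 0 := List.count_eq_zero.2 hin
        by_cases hd : w ∈ dup
        · simp [hin, hd, List.count_append, h0]
        · simp [hin, hd, List.count_append, h0]
          intro hw
          have := List.count_pos_iff.2 hw
          omega
    · by_cases hin : k ∈ all <;>
        simp [hin, hk, Ne.symm hk, List.count_append]

theorem dupA_mem (vl : List (List String)) (dup : List String) (w : String) :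
    w ∈ vl.foldl
        (fun dup_keys each_list =>
          (each_list.foldl
            (fun st each_key =>
              (if st.2.contains each_key then st.1 ++ [each_key] else st.1,
               st.2 ++ [each_key])) (dup_keys, ([] : List String))).1) dup
      ↔ w ∈ dup ∨ ∃ l ∈ vl, 2 ≤ l.count w := by
  induction vl generalizing dup with
  | nil => simp
  | cons l vl ih =>
    rw [List.foldl_cons, ih, dupA_inner_mem]
    simp only [List.count_nil, List.mem_cons, Nat.zero_add]
    constructor
    · rintro ((h | ⟨h1, h2⟩) | ⟨l', hl', h⟩)
      · exact Or.inl h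
      · exact Or.inr ⟨l, Or.inl rfl, h2⟩
      · exact Or.inr ⟨l', Or.inr hl', h⟩
    · rintro (h | ⟨l', hl' | hl', h⟩)
      · exact Or.inl (Or.inl h)
      · subst hl'
        exact Or.inl (Or.inr ⟨by omega, by omega⟩)
      · exact Or.inr ⟨l', hl', h⟩

-- B's adjacent-pair scan over a sorted list: a word is added iff it occurs twice.
theorem adjB_mem (s : List String) (h : s.Pairwise (· ≤ ·)) (b : PySem.Set String)
    (w : String) :
    w ∈ (s.zip s.tail).foldl
        (fun b p => if p.1 == p.2 then PySem.Set.add b p.2 else b) b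
      ↔ w ∈ b ∨ 2 ≤ s.count w := by
  induction s generalizing b with
  | nil => simp
  | cons x t ih =>
    cases t with
    | nil =>
      simp only [List.tail_cons, List.zip_nil_right, List.foldl_nil, List.count_cons,
        List.count_nil]
      constructor
      · exact Or.inl
      · rintro (hb | hc)
        · exact hb
        · exfalso; split at hc <;> omega
    | cons y t =>
      have hxy : x ≤ y := (List.pairwise_cons.1 h).1 _ (List.mem_cons_self)
      have hyt : ∀ z ∈ t, y ≤ z := fun z hz =>
        (List.pairwise_cons.1 ((List.pairwise_cons.1 h).2)).1 _ hz
      simp only [List.tail_cons, List.zip_cons_cons, List.foldl_cons]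
      rw [show ((y :: t).zip t) = ((y :: t).zip (y :: t).tail) from rfl,
        ih (List.pairwise_cons.1 h).2]
      by_cases hxey : x = y
      · subst hxey
        simp only [beq_self_eq_true, if_true, PySem.Set.mem_add]
        by_cases hwx : w = x
        · subst hwx
          have hc : 2 ≤ List.count w (w :: w :: t) := by
            simp
          simp only [List.count_cons, beq_self_eq_true, if_true] at hc ⊢
          constructor
          · intro _; exact Or.inr (by omega)
          · intro _; exact Or.inl (Or.inr trivial)
        · have hxw : (x == w) = false := beq_eq_false_iff_ne.2 (Ne.symm hwx)
          simp [List.count_cons, hxw, hwx]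
      · have hne : (x == y) = false := beq_eq_false_iff_ne.2 hxey
        simp only [hne, Bool.false_eq_true, if_false]
        by_cases hwx : w = x
        · subst hwx
          have h0 : (y :: t).count w = 0 := by
            refine List.count_eq_zero.2 ?_
            intro hmem
            rcases List.mem_cons.1 hmem with h' | h'
            · exact hxey h'
            · exact hxey (le_antisymm hxy (hyt _ h'))
          have hcc : (w :: y :: t).count w = 1 := by
            rw [List.count_cons, h0]
            simp
          simp [h0, hcc]
        · have hxw : (x == w) = false := beq_eq_false_iff_ne.2 (Ne.symm hwx)
          simp [List.count_cons, hxw]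

-- B's outer loop: a word lands in bad iff some list counts it at least twice.
theorem badB_mem (vl : List (List String)) (bad : PySem.Set String) (w : String) :
    w ∈ vl.foldl
        (fun bad each_list =>
          let s := PySem.List.sorted each_list (fun x => x) false
          (s.zip (PySem.List.slice s (some 1) none)).foldl
            (fun b p => if p.1 == p.2 then PySem.Set.add b p.2 else b) bad) bad
      ↔ w ∈ bad ∨ ∃ l ∈ vl, 2 ≤ l.count w := by
  induction vl generalizing bad with
  | nil => simp
  | cons l vl ih =>
    rw [List.foldl_cons, ih]
    simp only [PySem.List.slice_from_one]
    rw [adjB_mem _ (PySem.List.sorted_pairwise l (fun x => x) )]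
    rw [(PySem.List.sorted_perm l (fun x => x) false).count_eq w]
    simp only [List.mem_cons]
    constructor
    · rintro ((h | h) | ⟨l', hl', hc⟩)
      · exact Or.inl h
      · exact Or.inr ⟨l, Or.inl rfl, h⟩
      · exact Or.inr ⟨l', Or.inr hl', hc⟩
    · rintro (h | ⟨l', hl' | hl', hc⟩)
      · exact Or.inl (Or.inl h)
      · subst hl'; exact Or.inl (Or.inr hc)
      · exact Or.inr ⟨l', hl', hc⟩

-- ===== VERDICT (by name: the statement is the Claim_ definition above) =====
theorem get_unique_class_vocabulary_spec : Claim_equal_get_unique_class_vocabulary := by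
  intro vl _ _
  show _ = _
  unfold get_unique_class_vocabulary get_unique_class_vocabulary_alt
  have hmem : ∀ w : String,
      (get_duplicate_list vl).contains w =
        PySem.Set.contains (vl.foldl
          (fun bad each_list =>
            let s := PySem.List.sorted each_list (fun x => x) false
            (s.zip (PySem.List.slice s (some 1) none)).foldl
              (fun b p => if p.1 == p.2 then PySem.Set.add b p.2 else b) bad)
          PySem.Set.empty) w := by
    intro w
    have hiff : w ∈ get_duplicate_list vl ↔ w ∈ vl.foldl
        (fun bad each_list =>
          let s := PySem.List.sorted each_list (fun x => x) false
          (s.zip (PySem.List.slice s (some 1) none)).foldl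
            (fun b p => if p.1 == p.2 then PySem.Set.add b p.2 else b) bad)
        PySem.Set.empty := by
      rw [get_duplicate_list, dupA_mem vl [] w, badB_mem vl PySem.Set.empty w]
      simp [PySem.Set.empty]
    simp only [PySem.Set.contains]
    rw [Bool.eq_iff_iff]
    simpa using hiff
  have hvocab :
      vl.foldl (fun vocab each_list =>
        vocab ++ [each_list.foldl
          (fun new_vocab each_key =>
            if !((get_duplicate_list vl).contains each_key)
            then new_vocab ++ [each_key] else new_vocab) []]) []
      = vl.map (fun each_list =>
          each_list.filter (fun w => !(PySem.Set.contains (vl.foldl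
            (fun bad each_list =>
              let s := PySem.List.sorted each_list (fun x => x) false
              (s.zip (PySem.List.slice s (some 1) none)).foldl
                (fun b p => if p.1 == p.2 then PySem.Set.add b p.2 else b) bad)
            PySem.Set.empty) w))) := by
    simp only [PySem.List.foldl_append_singleton_eq_map, List.nil_append]
    refine List.map_congr_left fun l _ => ?_
    simp only [PySem.List.foldl_append_if_eq_filter, List.nil_append]
    exact List.filter_congr fun w _ => by rw [hmem w]
  simp only [hvocab]
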